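-- pv_equiv track=rewrite | github.com/kuangsangudu/algorithm | atcoder/atcoder beginer contest 250/E2.py | get_lenanddiff
-- ===== SOURCE A (Python) =====
-- def get_lenanddiff(a):
--     temp = set()
--     N = len(a)
--     a_length, a_diff = [0] * (N + 1), []
--     for i, n in enumerate(a, start=1):
--         if n not in temp:
--             temp.add(n)
--             a_diff.append(n)
--         a_length[i] = len(temp)
--     temp.clear()
--     return a_length, a_diff
-- ===== SOURCE B (Python) =====
-- def get_lenanddiff(a):
--     # Phase 1: first-occurrence order directly via dict.fromkeys.
--     a_diff = list(dict.fromkeys(a))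
--     # Phase 2: first-occurrence mask (1 when an element is new, else 0).
--     seen = set()
--     mask = []
--     for n in a:
--         mask.append(0 if n in seen else 1)
--         seen.add(n)
--     # Phase 3: running distinct count = cumulative sum of the mask.
--     a_length = [0]
--     total = 0
--     for m in mask:
--         total += m
--         a_length.append(total)
--     return a_length, a_diff
-- ===== Notes on version B (the rewrite author's own statement) =====
-- stated objective: idiomatic
-- what changed: Replaces A's single fused loop over a preallocated array (set membership, append, and indexed len(set) writes per step) by three separate phases: dict.fromkeys for the first-occurrence order, a first-occurrence 0/1 mask, and a cumulative-sum pass producing the prefix distinct counts.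
import Mathlib
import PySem

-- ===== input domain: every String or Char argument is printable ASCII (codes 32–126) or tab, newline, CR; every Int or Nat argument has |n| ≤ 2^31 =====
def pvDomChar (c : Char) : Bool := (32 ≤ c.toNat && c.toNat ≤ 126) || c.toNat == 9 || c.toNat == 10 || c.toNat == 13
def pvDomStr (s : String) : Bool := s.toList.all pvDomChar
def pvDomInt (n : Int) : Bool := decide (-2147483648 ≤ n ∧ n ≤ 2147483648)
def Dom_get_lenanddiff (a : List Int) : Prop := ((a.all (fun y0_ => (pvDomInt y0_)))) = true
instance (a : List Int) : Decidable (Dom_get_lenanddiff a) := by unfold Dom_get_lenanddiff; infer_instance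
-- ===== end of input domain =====

-- B: same result via three separate phases (dict.fromkeys dedup, first-occurrence mask, cumulative sum)
-- instead of A's single fused loop with indexed writes into a preallocated array; idiomatic, same cost.


-- ===== PORT A =====
-- loop body of A: membership test, conditional add/append, indexed write of len(temp)
def stepA (st : PySem.Set Int × List Int × List Int) (p : Int × Int) :
    PySem.Set Int × List Int × List Int :=
  let td := if PySem.Set.contains st.1 p.2 then (st.1, st.2.2)
            else (PySem.Set.add st.1 p.2, st.2.2 ++ [p.2])
  (td.1, PySem.List.pySetD st.2.1 p.1 (PySem.Set.len td.1), td.2)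

-- one fused loop over enumerate(a, start=1) writing into a preallocated [0]*(N+1)
def get_lenanddiff (a : List Int) : List Int × List Int :=
  let N := a.length
  let st := (PySem.List.enumerate a 1).foldl stepA
    ((PySem.Set.empty : PySem.Set Int), List.replicate (N + 1) (0 : Int), ([] : List Int))
  (st.2.1, st.2.2)

-- ===== PORT B =====
-- phase 1: dict.fromkeys dedup; phase 2: 0/1 first-occurrence mask; phase 3: cumulative sum
def get_lenanddiff_alt (a : List Int) : List Int × List Int :=
  let aDiff := PySem.List.dedup a
  let sm := a.foldl
    (fun (st : PySem.Set Int × List Int) n =>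
      (PySem.Set.add st.1 n,
       st.2 ++ [if PySem.Set.contains st.1 n then (0 : Int) else 1]))
    ((PySem.Set.empty : PySem.Set Int), ([] : List Int))
  let mask := sm.2
  let res := mask.foldl
    (fun (st : Int × List Int) m => (st.1 + m, st.2 ++ [st.1 + m]))
    ((0 : Int), ([0] : List Int))
  (res.2, aDiff)

-- ===== PRECONDITION & SPEC =====
def Spec_get_lenanddiff (a : List Int) (out : List Int × List Int) : Prop := out = get_lenanddiff_alt a
instance (a : List Int) (out : List Int × List Int) : Decidable (Spec_get_lenanddiff a out) := by unfold Spec_get_lenanddiff; infer_instance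

-- ===== CLAIM (what is proved, stated in full; the proofs are below) =====
def Claim_equal_get_lenanddiff : Prop := ∀ (a : List Int), Dom_get_lenanddiff a → Spec_get_lenanddiff a (get_lenanddiff a)

-- ===== LEMMAS AND PROOFS =====

-- reference: per-step (running distinct count, newly-seen elements) for A's loop
def specA (r : List Int) (t : PySem.Set Int) : List Int × List Int :=
  match r with
  | [] => ([], [])
  | n :: r' =>
    let t' := PySem.Set.add t n
    let p := specA r' t'
    (PySem.Set.len t' :: p.1, (if PySem.Set.contains t n then [] else [n]) ++ p.2)

-- reference: B's first-occurrence mask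
def maskOf (r : List Int) (t : PySem.Set Int) : List Int :=
  match r with
  | [] => []
  | n :: r' => (if PySem.Set.contains t n then (0 : Int) else 1) :: maskOf r' (PySem.Set.add t n)

-- reference: B's running prefix sums starting from c
def psum (m : List Int) (c : Int) : List Int :=
  match m with
  | [] => []
  | x :: m' => (c + x) :: psum m' (c + x)

theorem A_loop (r : List Int) : ∀ (t : PySem.Set Int) (P Q d : List Int),
    Q.length = r.length →
    (PySem.List.enumerate r (P.length : Int)).foldl stepA (t, P ++ Q, d)
    = (PySem.Set.update t r, P ++ (specA r t).1, d ++ (specA r t).2) := by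
  induction r with
  | nil =>
    intro t P Q d h
    have hQ : Q = [] := List.eq_nil_of_length_eq_zero h
    simp [hQ, PySem.List.enumerate, PySem.Set.update, specA]
  | cons n r' ih =>
    intro t P Q d h
    cases Q with
    | nil => simp at h
    | cons q Q' =>
      rw [PySem.List.enumerate_cons, List.foldl_cons]
      have hstep : stepA (t, P ++ q :: Q', d) ((P.length : Int), n)
          = (PySem.Set.add t n,
             (P ++ [PySem.Set.len (PySem.Set.add t n)]) ++ Q',
             d ++ (if PySem.Set.contains t n then [] else [n])) := by
        by_cases hm : n ∈ t
        · have hc : PySem.Set.contains t n = true := by simpa using hm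
          simp [stepA, hm, PySem.List.pySetD_natCast]
        · have hc : PySem.Set.contains t n = false := by simpa using hm
          simp [stepA, hm, PySem.List.pySetD_natCast]
      rw [hstep]
      have hlen : ((P.length : Int)) + 1
          = (((P ++ [PySem.Set.len (PySem.Set.add t n)]).length : Nat) : Int) := by
        simp
      rw [hlen, ih (PySem.Set.add t n) (P ++ [PySem.Set.len (PySem.Set.add t n)]) Q'
            (d ++ (if PySem.Set.contains t n then [] else [n])) (by simpa using h)]
      simp [specA, PySem.Set.update]

theorem update_eq_append (r : List Int) : ∀ (t : PySem.Set Int),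
    PySem.Set.update t r = t ++ (specA r t).2 := by
  induction r with
  | nil => intro t; simp [PySem.Set.update, specA]
  | cons n r' ih =>
    intro t
    have : PySem.Set.update t (n :: r') = PySem.Set.update (PySem.Set.add t n) r' := rfl
    rw [this, ih]
    by_cases hm : n ∈ t
    · simp [specA, hm]
    · have hc : PySem.Set.contains t n = false := by simpa using hm
      simp [specA, hm, PySem.Set.add]

theorem B_mask_loop (r : List Int) : ∀ (t : PySem.Set Int) (m : List Int),
    r.foldl
      (fun (st : PySem.Set Int × List Int) n =>
        (PySem.Set.add st.1 n,
         st.2 ++ [if PySem.Set.contains st.1 n then (0 : Int) else 1]))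
      (t, m)
    = (PySem.Set.update t r, m ++ maskOf r t) := by
  induction r with
  | nil => intro t m; simp [PySem.Set.update, maskOf]
  | cons n r' ih =>
    intro t m
    rw [List.foldl_cons, ih]
    simp [maskOf, PySem.Set.update]

theorem B_sum_loop (m : List Int) : ∀ (c : Int) (out : List Int),
    m.foldl (fun (st : Int × List Int) x => (st.1 + x, st.2 ++ [st.1 + x])) (c, out)
    = (c + m.sum, out ++ psum m c) := by
  induction m with
  | nil => intro c out; simp [psum]
  | cons x m' ih =>
    intro c out
    rw [List.foldl_cons, ih]
    simp [psum]; ring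

theorem len_add (t : PySem.Set Int) (n : Int) :
    PySem.Set.len (PySem.Set.add t n)
      = PySem.Set.len t + (if PySem.Set.contains t n then (0 : Int) else 1) := by
  by_cases hm : n ∈ t
  · simp [hm]
  · have hc : PySem.Set.contains t n = false := by simpa using hm
    simp [hm, PySem.Set.add, PySem.Set.len]

theorem psum_mask (r : List Int) : ∀ (t : PySem.Set Int) (c : Int),
    c = PySem.Set.len t → psum (maskOf r t) c = (specA r t).1 := by
  induction r with
  | nil => intro t c _; simp [maskOf, psum, specA]
  | cons n r' ih =>
    intro t c hc
    have hlen : c + (if PySem.Set.contains t n then (0 : Int) else 1)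
        = PySem.Set.len (PySem.Set.add t n) := by rw [hc, len_add]
    simp only [maskOf, psum, specA]
    rw [hlen, ih (PySem.Set.add t n) _ rfl]

theorem main_eq (a : List Int) : get_lenanddiff a = get_lenanddiff_alt a := by
  unfold get_lenanddiff get_lenanddiff_alt
  have hA := A_loop a PySem.Set.empty [0] (List.replicate a.length (0 : Int)) []
    (by simp)
  have hrep : List.replicate (a.length + 1) (0 : Int)
      = [0] ++ List.replicate a.length (0 : Int) := by
    simp [List.replicate_succ]
  have h1 : ((([(0 : Int)].length : Nat)) : Int) = 1 := by simp
  rw [h1] at hA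
  simp only [hrep]
  rw [hA]
  rw [B_mask_loop a PySem.Set.empty []]
  rw [B_sum_loop (([] : List Int) ++ maskOf a PySem.Set.empty) 0 [0]]
  simp only [List.nil_append, PySem.List.dedup_eq_ofList]
  have hdiff : PySem.Set.ofList a = (specA a PySem.Set.empty).2 := by
    have := update_eq_append a PySem.Set.empty
    rw [← PySem.Set.update_nil_left]
    simpa [PySem.Set.empty] using this
  have hsum : psum (maskOf a PySem.Set.empty) 0 = (specA a PySem.Set.empty).1 := by
    exact psum_mask a PySem.Set.empty 0 (by simp [PySem.Set.empty, PySem.Set.len])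
  simp only [PySem.Set.empty] at hdiff hsum
  simp [hdiff, hsum]

-- ===== VERDICT (by name: the statement is the Claim_ definition above) =====
theorem get_lenanddiff_spec : Claim_equal_get_lenanddiff := by
  intro a _
  unfold Spec_get_lenanddiff
  exact main_eq a
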